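-- pv_equiv track=rewrite | github.com/Coforge-forgeX/forgexpackages | src/common_adapters/doc_extract/parsing.py | parse_textract_blocks
-- ===== SOURCE A (Python) =====
-- from collections import defaultdict
-- from typing import Dict, List, Tuple
--
-- def parse_textract_blocks(blocks: List[Dict]) -> Tuple[str, List[str]]:
--     page_lines: Dict[int, List[str]] = defaultdict(list)
--     for b in blocks:
--         if b.get("BlockType") == "LINE" and "Text" in b:
--             page = int(b.get("Page") or 1)
--             page_lines[page].append(b["Text"])
--     ordered_pages = [page_lines[p] for p in sorted(page_lines.keys())]
--     pages_text = ["\n".join(lines) for lines in ordered_pages]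
--     full_text = "\n\n".join(pages_text)
--     return full_text, pages_text
-- ===== SOURCE B (Python) =====
-- def parse_textract_blocks(blocks):
--     tagged = [(int(b.get("Page") or 1), b["Text"])
--               for b in blocks
--               if b.get("BlockType") == "LINE" and "Text" in b]
--     tagged.sort(key=lambda pt: pt[0])  # stable: keeps within-page line order
--     pages_text = []
--     i, n = 0, len(tagged)
--     while i < n:
--         j = i
--         while j < n and tagged[j][0] == tagged[i][0]:
--             j += 1
--         pages_text.append("\n".join(t for _, t in tagged[i:j]))
--         i = j
--     return "\n\n".join(pages_text), pages_text
-- ===== Notes on version B (the rewrite author's own statement) =====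
-- stated objective: alternative
-- what changed: Replaces the defaultdict hash-grouping plus sorted(keys) re-lookup with a flat (page,text) tuple list that is stably sorted by page and then grouped by a single consecutive-run scan.
import Mathlib
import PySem

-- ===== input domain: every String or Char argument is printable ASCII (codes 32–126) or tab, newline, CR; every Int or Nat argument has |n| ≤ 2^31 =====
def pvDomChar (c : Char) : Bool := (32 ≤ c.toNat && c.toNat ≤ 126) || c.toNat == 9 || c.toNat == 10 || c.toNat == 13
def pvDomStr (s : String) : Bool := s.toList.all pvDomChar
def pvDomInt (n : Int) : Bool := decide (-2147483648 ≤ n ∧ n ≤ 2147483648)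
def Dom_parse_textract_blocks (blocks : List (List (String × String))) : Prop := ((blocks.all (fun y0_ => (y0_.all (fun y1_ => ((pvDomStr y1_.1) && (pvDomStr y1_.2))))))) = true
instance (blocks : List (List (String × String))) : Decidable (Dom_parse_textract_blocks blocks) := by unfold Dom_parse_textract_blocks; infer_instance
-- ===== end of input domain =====

-- B replaces A's defaultdict grouping + sorted(keys) re-lookup by a flat (page, text)
-- list that is stably sorted by page and grouped in one consecutive-run scan (alternative
-- decomposition, same results).

-- shared helper: page = int(b.get("Page") or 1)  (both Pythons contain this exact expression;
-- the ofStr? failure case is excluded by Pre_, where Python raises ValueError)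
def pvPage (d : PySem.Dict String String) : Int :=
  match d.get? "Page" with
  | some s => if s = "" then 1 else (PySem.Int.ofStr? s).getD 1
  | none => 1

-- ===== PORT A =====
def parse_textract_blocks (blocks : List (List (String × String))) : String × List String :=
  let page_lines : PySem.Dict Int (List String) :=
    blocks.foldl (fun acc b =>
      let d := PySem.Dict.ofList b
      if d.get? "BlockType" == some "LINE" && d.contains "Text" then
        acc.modify (pvPage d) [] (fun v => v ++ [d.getD "Text" ""])
      else acc) PySem.Dict.empty
  let ordered_pages :=
    (PySem.List.sorted page_lines.keys (fun p => p) false).map (fun p => page_lines.getD p [])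
  let pages_text := ordered_pages.map (fun lines => PySem.Str.join "\n" lines)
  (PySem.Str.join "\n\n" pages_text, pages_text)

-- ===== PORT B =====
-- the two-pointer run scan of Source B (inner 'while j' = takeWhile, 'i = j' = dropWhile)
def pvGroupJoin : List (Int × String) → List String
  | [] => []
  | x :: rest =>
    PySem.Str.join "\n" (x.2 :: (rest.takeWhile (fun q => q.1 == x.1)).map (fun q => q.2)) ::
      pvGroupJoin (rest.dropWhile (fun q => q.1 == x.1))
termination_by l => l.length
decreasing_by
  simp only [List.length_cons]
  exact Nat.lt_succ_of_le (List.length_dropWhile_le _ _)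

def parse_textract_blocks_alt (blocks : List (List (String × String))) : String × List String :=
  let tagged := blocks.filterMap (fun b =>
    let d := PySem.Dict.ofList b
    if d.get? "BlockType" == some "LINE" && d.contains "Text" then
      some (pvPage d, d.getD "Text" "")
    else none)
  let pages_text := pvGroupJoin (PySem.List.sorted tagged (fun pt => pt.1) false)
  (PySem.Str.join "\n\n" pages_text, pages_text)

-- ===== PRECONDITION & SPEC =====
-- Pre_ excludes exactly the inputs where Python A raises ValueError: a LINE block carrying
-- "Text" whose non-empty "Page" string is not int()-parseable (B raises there too).
def Pre_parse_textract_blocks (blocks : List (List (String × String))) : Prop :=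
  (blocks.all (fun b =>
    let d := PySem.Dict.ofList b
    !(d.get? "BlockType" == some "LINE" && d.contains "Text") ||
      (match d.get? "Page" with
       | none => true
       | some s => s == "" || (PySem.Int.ofStr? s).isSome))) = true
instance (blocks : List (List (String × String))) : Decidable (Pre_parse_textract_blocks blocks) := by
  unfold Pre_parse_textract_blocks; infer_instance

def pvWitness_parse_textract_blocks : (List (List (String × String))) :=
  [[("BlockType", "LINE"), ("Text", "hello"), ("Page", "2")],
   [("BlockType", "LINE"), ("Text", "world")],
   [("BlockType", "WORD"), ("Text", "w")],
   [("BlockType", "LINE"), ("Text", "again"), ("Page", "2")]]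

def Spec_parse_textract_blocks (blocks : List (List (String × String))) (out : String × List String) : Prop := out = parse_textract_blocks_alt blocks
instance (blocks : List (List (String × String))) (out : String × List String) : Decidable (Spec_parse_textract_blocks blocks out) := by unfold Spec_parse_textract_blocks; infer_instance

-- ===== CLAIM (what is proved, stated in full; the proofs are below) =====
def Claim_equal_parse_textract_blocks : Prop := ∀ (blocks : List (List (String × String))), Dom_parse_textract_blocks blocks → Pre_parse_textract_blocks blocks → Spec_parse_textract_blocks blocks (parse_textract_blocks blocks)

-- ===== LEMMAS AND PROOFS =====

-- the run decomposition: concatenation over ks of the page-p lines of L, in L order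
def pvRuns (ks : List Int) (L : List (Int × String)) : List (Int × String) :=
  ks.flatMap (fun p => L.filter (fun q => q.1 == p))

theorem pvMem_runs {q : Int × String} {ks : List Int} {L : List (Int × String)}
    (h : q ∈ pvRuns ks L) : q.1 ∈ ks ∧ q ∈ L := by
  simp only [pvRuns, List.mem_flatMap, List.mem_filter] at h
  obtain ⟨p, hp, hq, he⟩ := h
  exact ⟨by simpa using (beq_iff_eq.mp he ▸ hp), hq⟩

theorem pvInsertBy_forall_before {α : Type} (before : α → α → Bool) (x : α) (zs : List α)
    (h : ∀ z ∈ zs, before x z = true) :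
    PySem.List.insertBy before x zs = x :: zs := by
  cases zs with
  | nil => simp [PySem.List.insertBy]
  | cons z zs => simp [PySem.List.insertBy, h z (List.mem_cons_self ..)]

theorem pvInsertBy_append {α : Type} (before : α → α → Bool) (x : α) (ys zs : List α)
    (h : ∀ y ∈ ys, before x y = false) :
    PySem.List.insertBy before x (ys ++ zs) = ys ++ PySem.List.insertBy before x zs := by
  induction ys with
  | nil => simp
  | cons y ys ih =>
    simp only [List.cons_append, PySem.List.insertBy, h y (List.mem_cons_self ..)]
    simp only [Bool.false_eq_true, if_false, List.cons.injEq, true_and]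
    exact ih (fun a ha => h a (List.mem_cons_of_mem _ ha))

theorem pvRuns_append_notmem (ks : List Int) (x : Int × String) (L : List (Int × String))
    (hx : x.1 ∉ ks) : pvRuns ks (L ++ [x]) = pvRuns ks L := by
  induction ks with
  | nil => rfl
  | cons p ks ih =>
    have hne : (x.1 == p) = false := by
      simp only [beq_eq_false_iff_ne]; exact fun h => hx (h ▸ List.mem_cons_self ..)
    simp only [pvRuns, List.flatMap_cons, List.filter_append, List.filter_cons,
      List.filter_nil, hne] at *
    simp only [Bool.false_eq_true, if_false, List.append_nil]
    rw [ih (fun h => hx (List.mem_cons_of_mem _ h))]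

theorem pvInsert_runs_mem (ks : List Int) (x : Int × String) (L : List (Int × String))
    (hks : ks.Pairwise (· < ·)) (hmem : x.1 ∈ ks) :
    PySem.List.insertBy (fun a b => decide (a.1 < b.1)) x (pvRuns ks L) = pvRuns ks (L ++ [x]) := by
  induction ks with
  | nil => cases hmem
  | cons p ks ih =>
    have hlt : ∀ k ∈ ks, p < k := fun k hk => (List.pairwise_cons.mp hks).1 k hk
    simp only [pvRuns, List.flatMap_cons] at *
    by_cases hxp : x.1 = p
    · -- x belongs to the run of p: it goes to the end of that run
      have h1 : ∀ y ∈ L.filter (fun q => q.1 == p), (decide (x.1 < y.1)) = false := by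
        intro y hy
        have : y.1 = p := by simpa using (List.mem_filter.mp hy).2
        simp [this, hxp]
      have h2 : ∀ z ∈ ks.flatMap (fun p => L.filter (fun q => q.1 == p)),
          (decide (x.1 < z.1)) = true := by
        intro z hz
        have := pvMem_runs (ks := ks) (L := L) hz
        simp only [decide_eq_true_eq]
        exact hxp ▸ hlt _ this.1
      rw [pvInsertBy_append _ _ _ _ h1, pvInsertBy_forall_before _ _ _ h2]
      have hnot : x.1 ∉ ks := fun h => lt_irrefl p (hxp ▸ hlt _ h)
      have := pvRuns_append_notmem ks x L hnot
      simp only [pvRuns] at this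
      rw [this]
      simp [List.filter_append, hxp]
    · -- x belongs to a later run
      have hpx : p < x.1 := hlt _ ((List.mem_cons.mp hmem).resolve_left hxp)
      have h1 : ∀ y ∈ L.filter (fun q => q.1 == p), (decide (x.1 < y.1)) = false := by
        intro y hy
        have : y.1 = p := by simpa using (List.mem_filter.mp hy).2
        simp only [this, decide_eq_false_iff_not, not_lt]
        exact le_of_lt hpx
      rw [pvInsertBy_append _ _ _ _ h1]
      have hxp' : (x.1 == p) = false := by simpa using hxp
      rw [ih (List.pairwise_cons.mp hks).2 ((List.mem_cons.mp hmem).resolve_left hxp)]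
      simp [List.filter_append, List.filter_cons, hxp']

theorem pvInsert_runs_new (ks : List Int) (x : Int × String) (L : List (Int × String))
    (hks : ks.Pairwise (· < ·)) (hnot : x.1 ∉ ks)
    (hfil : L.filter (fun q => q.1 == x.1) = []) :
    PySem.List.insertBy (fun a b => decide (a.1 < b.1)) x (pvRuns ks L)
      = pvRuns (PySem.List.insertBy (fun a b => decide (a < b)) x.1 ks) (L ++ [x]) := by
  induction ks with
  | nil =>
    simp [pvRuns, PySem.List.insertBy, List.filter_append, hfil, List.filter_cons]
  | cons p ks ih =>
    have hlt : ∀ k ∈ ks, p < k := fun k hk => (List.pairwise_cons.mp hks).1 k hk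
    have hxp : x.1 ≠ p := fun h => hnot (h ▸ List.mem_cons_self ..)
    by_cases hc : x.1 < p
    · -- new first run
      have hins : PySem.List.insertBy (fun a b => decide (a < b)) x.1 (p :: ks)
          = x.1 :: p :: ks := by simp [PySem.List.insertBy, hc]
      rw [hins]
      have h2 : ∀ z ∈ pvRuns (p :: ks) L, (decide (x.1 < z.1)) = true := by
        intro z hz
        obtain ⟨hz1, _⟩ := pvMem_runs hz
        simp only [decide_eq_true_eq]
        rcases List.mem_cons.mp hz1 with h | h
        · exact h ▸ hc
        · exact lt_trans hc (hlt _ h)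
      rw [pvInsertBy_forall_before _ _ _ h2]
      have hr := pvRuns_append_notmem (p :: ks) x L hnot
      simp only [pvRuns, List.flatMap_cons] at hr ⊢
      rw [hr]
      simp [List.filter_append, hfil]
    · -- x.1 goes after run p
      have hpx : p < x.1 := by
        rcases lt_trichotomy x.1 p with h | h | h
        · exact absurd h hc
        · exact absurd h hxp
        · exact h
      have hins : PySem.List.insertBy (fun a b => decide (a < b)) x.1 (p :: ks)
          = p :: PySem.List.insertBy (fun a b => decide (a < b)) x.1 ks := by
        simp [PySem.List.insertBy, hc]
      rw [hins]
      have h1 : ∀ y ∈ L.filter (fun q => q.1 == p), (decide (x.1 < y.1)) = false := by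
        intro y hy
        have : y.1 = p := by simpa using (List.mem_filter.mp hy).2
        simp only [this, decide_eq_false_iff_not, not_lt]
        exact le_of_lt hpx
      have hxp' : (x.1 == p) = false := by simpa using hxp
      simp only [pvRuns, List.flatMap_cons] at ih ⊢
      rw [pvInsertBy_append _ _ _ _ h1,
        ih (List.pairwise_cons.mp hks).2 (fun h => hnot (List.mem_cons_of_mem _ h))]
      simp [List.filter_append, List.filter_cons, hxp']

theorem pvStable (L : List (Int × String)) :
    PySem.List.sorted L (fun q => q.1) false
      = pvRuns (PySem.List.sorted (PySem.Set.ofList (L.map (fun q => q.1))) (fun p => p) false) L := by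
  induction L using List.reverseRecOn with
  | nil => rfl
  | append_singleton L x ih =>
    have hsort : PySem.List.sorted (L ++ [x]) (fun q => q.1) false
        = PySem.List.insertBy (fun a b => decide (a.1 < b.1)) x
            (PySem.List.sorted L (fun q => q.1) false) := by
      rw [PySem.List.sorted_eq_foldl_insertBy, PySem.List.sorted_eq_foldl_insertBy,
        List.foldl_append]
      rfl
    have hmapp : (L ++ [x]).map (fun q => q.1) = L.map (fun q => q.1) ++ [x.1] := by simp
    have hof : PySem.Set.ofList (L.map (fun q => q.1) ++ [x.1])
        = PySem.Set.add (PySem.Set.ofList (L.map (fun q => q.1))) x.1 := by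
      simp [PySem.Set.ofList, List.foldl_append]
    rw [hsort, ih, hmapp, hof]
    by_cases hmem : x.1 ∈ PySem.Set.ofList (L.map (fun q => q.1))
    · have hadd : PySem.Set.add (PySem.Set.ofList (L.map (fun q => q.1))) x.1
          = PySem.Set.ofList (L.map (fun q => q.1)) := by
        have hc := (PySem.Set.contains_iff _ _).mpr hmem
        simp only [PySem.Set.add, hc, if_true]
      rw [hadd]
      exact pvInsert_runs_mem _ x L (PySem.List.sorted_ofList_pairwise_lt _)
        ((PySem.List.mem_sorted _ _ _ _).mpr hmem)
    · have hadd : PySem.Set.add (PySem.Set.ofList (L.map (fun q => q.1))) x.1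
          = PySem.Set.ofList (L.map (fun q => q.1)) ++ [x.1] := by
        have : (PySem.Set.ofList (L.map (fun q => q.1))).contains x.1 = false := by
          rw [Bool.eq_false_iff]
          exact fun h => hmem ((PySem.Set.contains_iff _ _).mp h)
        simp only [PySem.Set.add, this, Bool.false_eq_true, if_false]
      have hsortk : PySem.List.sorted (PySem.Set.ofList (L.map (fun q => q.1)) ++ [x.1])
            (fun p => p) false
          = PySem.List.insertBy (fun a b => decide (a < b)) x.1
              (PySem.List.sorted (PySem.Set.ofList (L.map (fun q => q.1))) (fun p => p) false) := by
        rw [PySem.List.sorted_eq_foldl_insertBy, PySem.List.sorted_eq_foldl_insertBy,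
          List.foldl_append]
        rfl
      rw [hadd, hsortk]
      have hnotmap : x.1 ∉ L.map (fun q => q.1) := fun h =>
        hmem ((PySem.Set.mem_ofList _ _).mpr h)
      refine pvInsert_runs_new _ x L (PySem.List.sorted_ofList_pairwise_lt _)
        (fun h => hmem ((PySem.List.mem_sorted _ _ _ _).mp h)) ?_
      rw [List.filter_eq_nil_iff]
      intro q hq hbeq
      exact hnotmap (by
        have : q.1 = x.1 := by simpa using hbeq
        exact this ▸ List.mem_map_of_mem hq)

theorem pvTakeWhile_append {α : Type} (q : α → Bool) (as bs : List α)
    (h : ∀ a ∈ as, q a = true) :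
    (as ++ bs).takeWhile q = as ++ bs.takeWhile q := by
  induction as with
  | nil => simp
  | cons a as ih =>
    simp only [List.cons_append, List.takeWhile_cons, h a (List.mem_cons_self ..), if_true]
    rw [ih (fun a ha => h a (List.mem_cons_of_mem _ ha))]

theorem pvDropWhile_append {α : Type} (q : α → Bool) (as bs : List α)
    (h : ∀ a ∈ as, q a = true) :
    (as ++ bs).dropWhile q = bs.dropWhile q := by
  induction as with
  | nil => simp
  | cons a as ih =>
    simp only [List.cons_append, List.dropWhile_cons, h a (List.mem_cons_self ..), if_true]
    exact ih (fun a ha => h a (List.mem_cons_of_mem _ ha))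

theorem pvTakeWhile_nil {α : Type} (q : α → Bool) (bs : List α)
    (h : ∀ a ∈ bs, q a = false) : bs.takeWhile q = [] := by
  cases bs with
  | nil => rfl
  | cons b bs => simp [h b (List.mem_cons_self ..)]

theorem pvDropWhile_self {α : Type} (q : α → Bool) (bs : List α)
    (h : ∀ a ∈ bs, q a = false) : bs.dropWhile q = bs := by
  cases bs with
  | nil => rfl
  | cons b bs => simp [h b (List.mem_cons_self ..)]

theorem pvGroup_runs (ks : List Int) (L : List (Int × String))
    (hks : ks.Pairwise (· < ·))
    (hne : ∀ p ∈ ks, L.filter (fun q => q.1 == p) ≠ []) :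
    pvGroupJoin (pvRuns ks L)
      = ks.map (fun p => PySem.Str.join "\n" ((L.filter (fun q => q.1 == p)).map (fun q => q.2))) := by
  induction ks with
  | nil => simp [pvRuns, pvGroupJoin]
  | cons p ks ih =>
    have hlt : ∀ k ∈ ks, p < k := fun k hk => (List.pairwise_cons.mp hks).1 k hk
    cases hF : L.filter (fun q => q.1 == p) with
    | nil => exact absurd hF (hne p (List.mem_cons_self ..))
    | cons y F' =>
      have hyF : ∀ a ∈ y :: F', (a.1 == p) = true := by
        intro a ha
        have : a ∈ L.filter (fun q => q.1 == p) := hF ▸ ha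
        exact (List.mem_filter.mp this).2
      have hy : y.1 = p := by simpa using hyF y (List.mem_cons_self ..)
      have hF' : ∀ a ∈ F', (a.1 == y.1) = true := fun a ha =>
        hy ▸ hyF a (List.mem_cons_of_mem _ ha)
      have hrest : ∀ z ∈ pvRuns ks L, (z.1 == y.1) = false := by
        intro z hz
        obtain ⟨hz1, _⟩ := pvMem_runs hz
        simp only [beq_eq_false_iff_ne, hy]
        exact fun h => lt_irrefl p (h ▸ hlt _ hz1)
      have hruns : pvRuns (p :: ks) L = y :: (F' ++ pvRuns ks L) := by
        simp only [pvRuns, List.flatMap_cons, hF, List.cons_append]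
      rw [hruns, pvGroupJoin]
      rw [pvTakeWhile_append _ _ _ hF', pvDropWhile_append _ _ _ hF',
        pvTakeWhile_nil _ _ hrest, pvDropWhile_self _ _ hrest]
      rw [ih (List.pairwise_cons.mp hks).2
        (fun k hk => hne k (List.mem_cons_of_mem _ hk))]
      simp [hF]

theorem pvFoldA (blocks : List (List (String × String))) (d : PySem.Dict Int (List String)) :
    blocks.foldl (fun acc b =>
      let dd := PySem.Dict.ofList b
      if dd.get? "BlockType" == some "LINE" && dd.contains "Text" then
        acc.modify (pvPage dd) [] (fun v => v ++ [dd.getD "Text" ""])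
      else acc) d
    = (blocks.filterMap (fun b =>
        let dd := PySem.Dict.ofList b
        if dd.get? "BlockType" == some "LINE" && dd.contains "Text" then
          some (pvPage dd, dd.getD "Text" "")
        else none)).foldl (fun acc p => acc.modify p.1 [] (fun v => v ++ [p.2])) d := by
  induction blocks generalizing d with
  | nil => rfl
  | cons b bs ih =>
    simp only [List.foldl_cons, List.filterMap_cons]
    by_cases h : (PySem.Dict.ofList b).get? "BlockType" == some "LINE" && (PySem.Dict.ofList b).contains "Text"
    · simp only [h, if_true]; exact ih _
    · simp only [h]; simp only [Bool.false_eq_true, if_false]; exact ih _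

-- ===== VERDICT (by name: the statement is the Claim_ definition above) =====
theorem parse_textract_blocks_spec : Claim_equal_parse_textract_blocks := by
  intro blocks _hdom _hpre
  unfold Spec_parse_textract_blocks parse_textract_blocks parse_textract_blocks_alt
  rw [pvFoldA]
  set L := blocks.filterMap (fun b =>
    let dd := PySem.Dict.ofList b
    if dd.get? "BlockType" == some "LINE" && dd.contains "Text" then
      some (pvPage dd, dd.getD "Text" "")
    else none) with hLdef
  have hkeys : (L.foldl (fun acc p => acc.modify p.1 [] (fun v => v ++ [p.2]))
        PySem.Dict.empty).keys = PySem.Set.ofList (L.map (fun p => p.1)) := by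
    have h := PySem.Dict.keys_foldl_modify_key L (fun p => p.1) ([] : List String)
      (fun _ p v => v ++ [p.2]) PySem.Dict.empty
    simpa [PySem.Dict.keys_empty, PySem.Set.update, PySem.Set.ofList, PySem.Set.empty] using h
  have hget : ∀ c, (L.foldl (fun acc p => acc.modify p.1 [] (fun v => v ++ [p.2]))
        PySem.Dict.empty).getD c ([] : List String)
      = (L.filter (fun q => q.1 == c)).map (fun q => q.2) := by
    intro c
    have h := PySem.Dict.getD_foldl_modify_append L PySem.Dict.empty c
    simpa [PySem.Dict.getD_empty] using h
  have hpair : (PySem.List.sorted (PySem.Set.ofList (L.map (fun q => q.1)))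
      (fun p => p) false).Pairwise (· < ·) := PySem.List.sorted_ofList_pairwise_lt _
  have hne : ∀ p ∈ PySem.List.sorted (PySem.Set.ofList (L.map (fun q => q.1)))
      (fun p => p) false, L.filter (fun q => q.1 == p) ≠ [] := by
    intro p hp
    have : p ∈ L.map (fun q => q.1) :=
      (PySem.Set.mem_ofList _ _).mp ((PySem.List.mem_sorted _ _ _ _).mp hp)
    obtain ⟨q, hqL, hq1⟩ := List.mem_map.mp this
    intro hnil
    have : q ∈ L.filter (fun q => q.1 == p) :=
      List.mem_filter.mpr ⟨hqL, by simp [hq1]⟩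
    simp [hnil] at this
  have hpages : ((PySem.List.sorted ((L.foldl (fun acc p => acc.modify p.1 []
          (fun v => v ++ [p.2])) PySem.Dict.empty).keys) (fun p => p) false).map
        (fun p => (L.foldl (fun acc p => acc.modify p.1 [] (fun v => v ++ [p.2]))
          PySem.Dict.empty).getD p [])).map (fun lines => PySem.Str.join "\n" lines)
      = pvGroupJoin (PySem.List.sorted L (fun pt => pt.1) false) := by
    rw [hkeys, List.map_map, pvStable L,
      pvGroup_runs _ _ hpair hne]
    exact List.map_congr_left (fun p _ => by rw [Function.comp_apply, hget p])
  simp only [hpages]
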